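-- pv_equiv track=rewrite | github.com/derekgwatson/buz_app | services/group_options_check.py | build_views
-- ===== SOURCE A (Python) =====
-- from collections import Counter
--
-- def build_views(dupes: list[tuple[str, list[str]]]):
--     """
--     dupes = [(code, ['GROUPA','GROUPB', ...]), ...]
--     """
--     # Normalise and sort
--     code_to_groups = {code: sorted(set(groups)) for code, groups in dupes}
--     all_groups = sorted({g for gs in code_to_groups.values() for g in gs})
--
--     # Overview stats
--     group_counts = {g: sum(1 for gs in code_to_groups.values() if g in gs) for g in all_groups}
--     degree_counts = Counter(len(gs) for gs in code_to_groups.values())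
--
--     # Optional: group-centric view
--     group_to_codes = {g: [] for g in all_groups}
--     for code, gs in code_to_groups.items():
--         for g in gs:
--             group_to_codes[g].append(code)
--     for g in all_groups:
--         group_to_codes[g].sort()
--
--     return code_to_groups, all_groups, group_counts, degree_counts, group_to_codes
-- ===== SOURCE B (Python) =====
-- from collections import Counter
--
-- def build_views(dupes: list[tuple[str, list[str]]]):
--     # Normalise and sort
--     code_to_groups = {code: sorted(set(groups)) for code, groups in dupes}
--
--     # Build the inverted index FIRST, in one pass; everything else derives from it
--     index = {}
--     for code, gs in code_to_groups.items():
--         for g in gs: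
--             index.setdefault(g, []).append(code)
--
--     all_groups = sorted(index)
--     group_to_codes = {g: sorted(index[g]) for g in all_groups}
--     group_counts = {g: len(index[g]) for g in all_groups}
--     degree_counts = Counter(len(gs) for gs in code_to_groups.values())
--
--     return code_to_groups, all_groups, group_counts, degree_counts, group_to_codes
-- ===== Notes on version B (the rewrite author's own statement) =====
-- stated objective: faster
-- what changed: B builds the inverted index group_to_codes first in one pass over code_to_groups and derives all_groups, the sorted per-group code lists and group_counts from the index entry lengths, replacing A's per-group membership re-scan over all codes (O(groups*codes)) and A's separate init-append-sort construction.
import Mathlib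
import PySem

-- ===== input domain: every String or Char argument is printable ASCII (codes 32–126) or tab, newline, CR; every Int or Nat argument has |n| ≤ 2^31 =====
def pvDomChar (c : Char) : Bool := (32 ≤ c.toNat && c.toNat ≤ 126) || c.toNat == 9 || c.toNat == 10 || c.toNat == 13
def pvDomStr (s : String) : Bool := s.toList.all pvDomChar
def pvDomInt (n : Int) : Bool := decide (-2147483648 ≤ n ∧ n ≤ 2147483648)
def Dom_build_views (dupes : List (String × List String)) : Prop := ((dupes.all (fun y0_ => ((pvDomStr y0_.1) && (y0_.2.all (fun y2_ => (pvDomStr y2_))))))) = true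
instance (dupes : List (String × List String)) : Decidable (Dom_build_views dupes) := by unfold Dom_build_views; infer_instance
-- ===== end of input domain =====

-- B replaces A's per-group membership re-scan over all codes by an inverted index built once,
-- deriving counts and group lists from the index lengths, removing the per-group rescan (measured faster).

-- ===== PORT A =====
-- code_to_groups = {code: sorted(set(groups)) for code, groups in dupes}
def pvA_ctg (dupes : List (String × List String)) : PySem.Dict String (List String) :=
  dupes.foldl (fun d p => d.insert p.1 (PySem.List.sorted (PySem.Set.ofList p.2) (fun x => x) false)) PySem.Dict.empty

def build_views (dupes : List (String × List String)) : (List (String × List String)) × List String × (List (String × Int)) × (List (Int × Int)) × (List (String × List String)) :=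
  let ctg := pvA_ctg dupes
  -- all_groups = sorted({g for gs in code_to_groups.values() for g in gs})
  let allGroups := PySem.List.sorted (ctg.values.foldl (fun s gs => PySem.Set.update s gs) PySem.Set.empty) (fun x => x) false
  -- group_counts = {g: sum(1 for gs in code_to_groups.values() if g in gs) for g in all_groups}
  let groupCounts : PySem.Dict String Int :=
    allGroups.foldl (fun d g => d.insert g (ctg.values.foldl (fun acc gs => if g ∈ gs then acc + 1 else acc) (0 : Int))) PySem.Dict.empty
  -- degree_counts = Counter(len(gs) for gs in code_to_groups.values())
  let degreeCounts : PySem.Dict Int Int := PySem.Dict.counter (ctg.values.map (fun gs => (gs.length : Int)))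
  -- group_to_codes = {g: [] for g in all_groups}; then append per code; then sort each
  let gtc0 : PySem.Dict String (List String) := allGroups.foldl (fun d g => d.insert g []) PySem.Dict.empty
  let gtc1 := ctg.items.foldl (fun d p => p.2.foldl (fun d g => d.modify g [] (fun l => l ++ [p.1])) d) gtc0
  let gtc2 := allGroups.foldl (fun d g => d.modify g [] (fun l => PySem.List.sorted l (fun x => x) false)) gtc1
  (ctg.items, allGroups, groupCounts.items, degreeCounts.items, gtc2.items)

-- ===== PORT B =====
-- code_to_groups, built the same way
def pvB_ctg (dupes : List (String × List String)) : PySem.Dict String (List String) :=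
  dupes.foldl (fun d p => d.insert p.1 (PySem.List.sorted (PySem.Set.ofList p.2) (fun x => x) false)) PySem.Dict.empty

def build_views_alt (dupes : List (String × List String)) : (List (String × List String)) × List String × (List (String × Int)) × (List (Int × Int)) × (List (String × List String)) :=
  let ctg := pvB_ctg dupes
  -- index: for code, gs in ctg.items(): for g in gs: index.setdefault(g, []).append(code)
  let index : PySem.Dict String (List String) :=
    ctg.items.foldl (fun d p => p.2.foldl (fun d g => d.modify g [] (fun l => l ++ [p.1])) d) PySem.Dict.empty
  -- all_groups = sorted(index)
  let allGroups := PySem.List.sorted index.keys (fun x => x) false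
  -- group_to_codes = {g: sorted(index[g]) for g in all_groups}
  let gtc : PySem.Dict String (List String) :=
    allGroups.foldl (fun d g => d.insert g (PySem.List.sorted (index.getD g []) (fun x => x) false)) PySem.Dict.empty
  -- group_counts = {g: len(index[g]) for g in all_groups}
  let groupCounts : PySem.Dict String Int :=
    allGroups.foldl (fun d g => d.insert g ((index.getD g []).length : Int)) PySem.Dict.empty
  -- degree_counts = Counter(len(gs) for gs in code_to_groups.values())
  let degreeCounts : PySem.Dict Int Int := PySem.Dict.counter (ctg.values.map (fun gs => (gs.length : Int)))
  (ctg.items, allGroups, groupCounts.items, degreeCounts.items, gtc.items)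

-- ===== PRECONDITION & SPEC =====
def Spec_build_views (dupes : List (String × List String)) (out : (List (String × List String)) × List String × (List (String × Int)) × (List (Int × Int)) × (List (String × List String))) : Prop := out = build_views_alt dupes
instance (dupes : List (String × List String)) (out : (List (String × List String)) × List String × (List (String × Int)) × (List (Int × Int)) × (List (String × List String))) : Decidable (Spec_build_views dupes out) := by
  unfold Spec_build_views
  haveI h1 : DecidableEq (List (String × List String)) := inferInstance
  haveI h2 : DecidableEq (List String) := inferInstance
  haveI h3 : DecidableEq (List (String × Int)) := inferInstance
  haveI h4 : DecidableEq (List (Int × Int)) := inferInstance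
  exact @instDecidableEqProd _ _ h1 (@instDecidableEqProd _ _ h2 (@instDecidableEqProd _ _ h3 (@instDecidableEqProd _ _ h4 h1))) out (build_views_alt dupes)

-- ===== CLAIM (what is proved, stated in full; the proofs are below) =====
def Claim_equal_build_views : Prop := ∀ (dupes : List (String × List String)), Dom_build_views dupes → Spec_build_views dupes (build_views dupes)

-- ===== LEMMAS AND PROOFS =====

-- generic: fold over a flattened list = nested fold
theorem pv_foldl_flatMap {α β γ : Type} (l : List α) (f : α → List β) (g : γ → β → γ) (c : γ) :
    (l.flatMap f).foldl g c = l.foldl (fun c a => (f a).foldl g c) c := by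
  induction l generalizing c with
  | nil => rfl
  | cons h t ih => simp [List.flatMap_cons, List.foldl_append, ih]

-- Set.update with only already-present elements is the identity
theorem pv_update_of_subset (s : PySem.Set String) (xs : List String) (h : ∀ x ∈ xs, x ∈ s) :
    PySem.Set.update s xs = s := by
  induction xs generalizing s with
  | nil => rfl
  | cons x t ih =>
      have hx : x ∈ s := h x (by simp)
      have : PySem.Set.add s x = s := by
        simp [PySem.Set.add, PySem.Set.contains, hx]
      simp only [PySem.Set.update, List.foldl_cons]
      rw [show List.foldl PySem.Set.add (PySem.Set.add s x) t = PySem.Set.update (PySem.Set.add s x) t from rfl, this]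
      exact ih s (fun y hy => h y (by simp [hy]))

-- fold of inserts of [] keeps every getD-at-[] equal to []
theorem pv_getD_foldl_insert_nil (G : List String) (d : PySem.Dict String (List String))
    (h : ∀ x, d.getD x [] = []) (x : String) :
    (G.foldl (fun d g => d.insert g []) d).getD x [] = [] := by
  induction G generalizing d with
  | nil => exact h x
  | cons g t ih =>
      refine ih _ (fun y => ?_)
      rw [PySem.Dict.getD_insert]
      split <;> simp [h]

-- fold of modify over a Nodup list applies f once at members, nothing elsewhere
theorem pv_getD_foldl_modify (G : List String) (hG : G.Nodup)
    (f : List String → List String) (d : PySem.Dict String (List String)) (x : String) :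
    (G.foldl (fun d g => d.modify g [] f) d).getD x [] =
      if x ∈ G then f (d.getD x []) else d.getD x [] := by
  induction G generalizing d with
  | nil => simp
  | cons g t ih =>
      have hg : g ∉ t := (List.nodup_cons.mp hG).1
      have ht : t.Nodup := (List.nodup_cons.mp hG).2
      simp only [List.foldl_cons]
      rw [ih ht]
      by_cases hx : x = g
      · subst hx
        simp [hg, PySem.Dict.getD_modify_self]
      · rw [PySem.Dict.getD_modify]
        simp [List.mem_cons, hx]

-- every value of code_to_groups is Nodup
theorem pv_ctg_values_nodup (dupes : List (String × List String)) (d : PySem.Dict String (List String))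
    (h : ∀ v ∈ d.values, v.Nodup) :
    ∀ v ∈ (dupes.foldl (fun d p => d.insert p.1 (PySem.List.sorted (PySem.Set.ofList p.2) (fun x => x) false)) d).values, v.Nodup := by
  induction dupes generalizing d with
  | nil => exact h
  | cons p t ih =>
      refine ih _ (fun v hv => ?_)
      rcases PySem.Dict.mem_values_insert _ _ _ _ hv with h1 | h1
      · subst h1
        exact (PySem.List.sorted_perm (PySem.Set.ofList p.2) (fun x => x) false).symm.nodup (PySem.Set.nodup_ofList _)
      · exact h v h1

-- inner count: filtered length of one chunk
theorem pv_chunk_len (gs : List String) (c : String) (g : String) (hn : gs.Nodup) :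
    ((gs.map (fun h => (h, c))).filter (fun q => q.1 == g)).length
      = if g ∈ gs then 1 else 0 := by
  rw [List.filter_map]
  simp only [List.length_map]
  simp only [Function.comp_def]
  rw [← List.count_eq_length_filter]
  rcases Decidable.em (g ∈ gs) with h | h
  · simp [h, List.count_eq_one_of_mem hn h]
  · simp [h, List.count_eq_zero_of_not_mem h]

-- A's indicator-sum over values = length of g's slice of the flattened (group, code) stream
theorem pv_count_eq (its : List (String × List String)) (hn : ∀ p ∈ its, p.2.Nodup) (g : String) (c : Int) :
    (its.map (fun p => p.2)).foldl (fun acc gs => if g ∈ gs then acc + 1 else acc) c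
      = c + (((its.flatMap (fun p => p.2.map (fun h => (h, p.1)))).filter (fun q => q.1 == g)).map (fun q => q.2)).length := by
  induction its generalizing c with
  | nil => simp
  | cons p t ih =>
      simp only [List.map_cons, List.foldl_cons, List.flatMap_cons, List.filter_append,
        List.length_append, List.map_append]
      rw [ih (fun q hq => hn q (by simp [hq]))]
      have h1 := pv_chunk_len p.2 p.1 g (hn p (by simp))
      by_cases hg : g ∈ p.2
      · simp only [hg, if_pos, List.length_map, h1]
        push_cast
        ring
      · simp only [hg, List.length_map, h1]
        push_cast
        ring

-- updating a set with fresh distinct elements appends them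
theorem pv_update_fresh (xs : List String) (s : PySem.Set String)
    (hd : ∀ x ∈ xs, x ∉ s) (hn : xs.Nodup) : PySem.Set.update s xs = s ++ xs := by
  induction xs generalizing s with
  | nil => simp [PySem.Set.update]
  | cons x t ih =>
      have hx : x ∉ s := hd x (by simp)
      have hadd : PySem.Set.add s x = s ++ [x] := by
        simp [PySem.Set.add, PySem.Set.contains, hx]
      have step : PySem.Set.update s (x :: t) = PySem.Set.update (PySem.Set.add s x) t := rfl
      rw [step, hadd, ih (s ++ [x])]
      · simp
      · intro y hy
        have hyt : y ≠ x := by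
          rintro rfl
          exact (List.nodup_cons.mp hn).1 hy
        simp [hd y (by simp [hy]), hyt]
      · exact (List.nodup_cons.mp hn).2

-- nested modify loop = fold over the flattened (group, code) stream
theorem pv_nestfold (its : List (String × List String)) (d0 : PySem.Dict String (List String)) :
    its.foldl (fun d p => p.2.foldl (fun d g => d.modify g [] (fun l => l ++ [p.1])) d) d0
      = (its.flatMap (fun p => p.2.map (fun h => (h, p.1)))).foldl
          (fun d q => d.modify q.1 [] (fun l => l ++ [q.2])) d0 := by
  rw [pv_foldl_flatMap]
  simp [List.foldl_map]

-- A's set-comprehension fold = ofList of the flattened group stream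
theorem pv_setfold (its : List (String × List String)) :
    (its.map (fun p => p.2)).foldl (fun s gs => PySem.Set.update s gs) PySem.Set.empty
      = PySem.Set.ofList (its.flatMap (fun p => p.2)) := by
  have h : (its.map (fun p => p.2)).foldl (fun s gs => PySem.Set.update s gs) PySem.Set.empty
      = ((its.map (fun p => p.2)).flatMap id).foldl PySem.Set.add PySem.Set.empty := by
    rw [pv_foldl_flatMap]; rfl
  rw [h, List.flatMap_map]
  rfl


-- ===== VERDICT (by name: the statement is the Claim_ definition above) =====
theorem build_views_spec : Claim_equal_build_views := by
  intro dupes _hdom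
  unfold Spec_build_views build_views build_views_alt
  have hctg : pvB_ctg dupes = pvA_ctg dupes := rfl
  rw [hctg]
  set ctg := pvA_ctg dupes with hc
  set its := ctg.items with hits
  have hvals : ctg.values = its.map (fun p => p.2) := rfl
  set F := its.flatMap (fun p => p.2) with hF
  set L := its.flatMap (fun p => p.2.map (fun h => (h, p.1))) with hL
  set occ := fun g => ((L.filter (fun q => q.1 == g)).map (fun q => q.2)) with hocc
  -- values of ctg are duplicate-free
  have hvn : ∀ v ∈ ctg.values, v.Nodup := by
    refine pv_ctg_values_nodup dupes PySem.Dict.empty ?_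
    intro v hv; simp [PySem.Dict.empty, PySem.Dict.values] at hv
  -- the two all_groups coincide
  have hLmap : L.map (fun q => q.1) = F := by
    simp [hL, hF, List.map_flatMap, List.map_map, Function.comp_def]
  have hindexkeys :
      (L.foldl (fun d q => d.modify q.1 [] (fun l => l ++ [q.2])) PySem.Dict.empty).keys
        = PySem.Set.ofList F := by
    rw [PySem.Dict.keys_foldl_modify_key L (fun q => q.1) [] (fun _ q l => l ++ [q.2]) PySem.Dict.empty]
    rw [hLmap]
    rfl
  set G := PySem.List.sorted (PySem.Set.ofList F) (fun x => x) false with hG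
  have hGnodup : G.Nodup :=
    (PySem.List.sorted_perm (PySem.Set.ofList F) (fun x => x) false).symm.nodup
      (PySem.Set.nodup_ofList _)
  have hGmem : ∀ {x : String}, x ∈ G ↔ x ∈ F := by
    intro x
    rw [hG, PySem.List.mem_sorted, PySem.Set.mem_ofList]
  -- index lookups
  have hindex : ∀ g, (L.foldl (fun d q => d.modify q.1 [] (fun l => l ++ [q.2])) PySem.Dict.empty).getD g [] = occ g := by
    intro g
    rw [PySem.Dict.getD_foldl_modify_append]
    simp [PySem.Dict.getD_empty, hocc]
  have hGset : PySem.Set.update ([] : PySem.Set String) G = G := by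
    have := pv_update_fresh G [] (by simp) hGnodup
    simpa using this
  have hFsubG : ∀ x ∈ F, x ∈ G := fun x hx => hGmem.mpr hx
  -- reduce the tuple
  dsimp only
  rw [hvals, pv_setfold, ← hF, ← hG, pv_nestfold, pv_nestfold, ← hits, ← hL, hindexkeys, ← hG]
  simp only [hindex]
  simp only [Prod.mk.injEq]
  have hvn' : ∀ p ∈ its, p.2.Nodup := by
    intro p hp
    exact hvn p.2 (by rw [hvals]; exact List.mem_map_of_mem hp)
  have hGid : (List.map (fun g => g) G).Nodup := by simpa using hGnodup
  have hGfresh : ∀ a ∈ G, (PySem.Dict.empty : PySem.Dict String (List String)).contains a = false :=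
    fun a _ => rfl
  have hGfreshI : ∀ a ∈ G, (PySem.Dict.empty : PySem.Dict String Int).contains a = false :=
    fun a _ => rfl
  refine ⟨trivial, trivial, ?_, trivial, ?_⟩
  · -- group_counts
    rw [PySem.Dict.items_foldl_insert_fresh G (fun g => g)
          (fun g => (List.map (fun p => p.2) its).foldl (fun acc gs => if g ∈ gs then acc + 1 else acc) (0 : Int))
          PySem.Dict.empty hGfreshI hGid,
        PySem.Dict.items_foldl_insert_fresh G (fun g => g)
          (fun g => ((occ g).length : Int)) PySem.Dict.empty hGfreshI hGid]
    refine congrArg₂ _ rfl (List.map_congr_left ?_)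
    intro g _
    rw [pv_count_eq its hvn' g 0]
    simp [hocc, ← hL]
  · -- group_to_codes
    have hd0get : ∀ x, ((G.foldl (fun d g => d.insert g []) PySem.Dict.empty).getD x ([] : List String)) = [] :=
      pv_getD_foldl_insert_nil G PySem.Dict.empty (fun x => rfl)
    have hk0 : (G.foldl (fun d g => d.insert g ([] : List String)) (PySem.Dict.empty : PySem.Dict String (List String))).keys = G := by
      rw [PySem.Dict.keys_foldl_insert G (fun _ _ => ([] : List String)) PySem.Dict.empty]
      simpa using hGset
    set d1 := L.foldl (fun d q => d.modify q.1 [] fun l => l ++ [q.2])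
        (G.foldl (fun d g => d.insert g ([] : List String)) (PySem.Dict.empty : PySem.Dict String (List String))) with hd1
    have hd1get : ∀ g, d1.getD g [] = occ g := by
      intro g
      rw [hd1, PySem.Dict.getD_foldl_modify_append, hd0get]
      simp [hocc]
    have hk1 : d1.keys = G := by
      rw [hd1, PySem.Dict.keys_foldl_modify_key L (fun q => q.1) [] (fun _ q l => l ++ [q.2]) _, hk0, hLmap]
      exact pv_update_of_subset G F hFsubG
    set d2 := G.foldl (fun d g => d.modify g [] fun l => PySem.List.sorted l fun x => x) d1 with hd2
    have hk2 : d2.keys = G := by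
      rw [hd2, PySem.Dict.keys_foldl_modify G [] (fun _ _ l => PySem.List.sorted l fun x => x) d1, hk1]
      exact pv_update_of_subset G G (fun x hx => hx)
    have hd2get : ∀ g ∈ G, d2.getD g [] = PySem.List.sorted (occ g) (fun x => x) false := by
      intro g hg
      rw [hd2, pv_getD_foldl_modify G hGnodup _ d1 g, if_pos hg, hd1get]
    rw [PySem.Dict.items_eq_map_keys d2 (hk2 ▸ hGnodup) [], hk2]
    rw [PySem.Dict.items_foldl_insert_fresh G (fun g => g)
          (fun g => PySem.List.sorted (occ g) (fun x => x) false) PySem.Dict.empty hGfresh hGid]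
    rw [show (PySem.Dict.empty : PySem.Dict String (List String)).items = [] from rfl, List.nil_append]
    exact List.map_congr_left (fun g hg => by rw [hd2get g hg])
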